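-- pv_equiv track=rewrite | github.com/couchbase/testrunner | pysystests/tools/push_stats.py | sortDBData
-- ===== SOURCE A (Python) =====
-- def sortDBData(data):
--
--   sorted_data = []
--   keys = []
--   if(data):
--     keys = sorted(data.keys())
--
--   for ts in keys:
--     sorted_data.append(data[ts])
--
--   return keys, sorted_data
-- ===== SOURCE B (Python) =====
-- def sortDBData(data):
--     # One-pass insertion sort into two parallel lists; never calls sorted().
--     # The insertion point is found by a hand-written binary search (no imports).
--     keys = []
--     sorted_data = []
--     for k in data:
--         lo, hi = 0, len(keys)
--         while lo < hi:
--             mid = (lo + hi) // 2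
--             if keys[mid] < k:
--                 lo = mid + 1
--             else:
--                 hi = mid
--         keys.insert(lo, k)
--         sorted_data.insert(lo, data[k])
--     return keys, sorted_data
-- ===== Notes on version B (the rewrite author's own statement) =====
-- stated objective: alternative
-- what changed: B never calls sorted(): it does a single pass over the dict, inserting each key and its value into two parallel lists at the position found by a hand-written binary search (an incremental insertion sort), instead of A's sort-the-keys-then-look-each-one-up-in-the-dict loop.
import Mathlib
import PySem

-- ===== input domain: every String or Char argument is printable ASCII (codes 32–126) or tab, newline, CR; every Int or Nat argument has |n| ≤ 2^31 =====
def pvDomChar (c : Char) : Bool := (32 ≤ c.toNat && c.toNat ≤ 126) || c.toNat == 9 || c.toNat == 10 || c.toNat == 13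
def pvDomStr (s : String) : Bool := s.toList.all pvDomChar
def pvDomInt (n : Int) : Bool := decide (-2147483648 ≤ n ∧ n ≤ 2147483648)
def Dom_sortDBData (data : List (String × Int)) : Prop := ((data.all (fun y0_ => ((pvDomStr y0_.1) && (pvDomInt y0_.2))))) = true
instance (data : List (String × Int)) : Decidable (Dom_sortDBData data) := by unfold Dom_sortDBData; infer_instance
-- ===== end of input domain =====

-- B replaces A's sort-keys-then-look-each-up loop by a single pass that insertion-sorts
-- each key and its value into two parallel lists; same result, different algorithm.

-- ===== PORT A =====
def sortDBData (data : List (String × Int)) : List String × List Int :=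
  let d := PySem.Dict.ofList data
  -- if(data): keys = sorted(data.keys())
  let keys : List String := if d.size ≠ 0 then PySem.List.sorted d.keys (fun k => k) false else []
  -- for ts in keys: sorted_data.append(data[ts])  (ts is always a key of d, so the lookup never raises)
  let sorted_data : List Int := keys.foldl (fun acc ts => acc ++ [d.getD ts 0]) []
  (keys, sorted_data)

-- ===== PORT B =====
-- hand-ported binary search: lo, hi = 0, len(keys); while lo < hi: … (exact on Nat, `//2` = Nat division)
def bisectLoop (keys : List String) (k : String) (lo hi : Nat) : Nat :=
  if lo < hi then
    let mid := (lo + hi) / 2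
    if keys.getD mid "" < k then bisectLoop keys k (mid + 1) hi
    else bisectLoop keys k lo mid
  else lo
termination_by hi - lo
decreasing_by all_goals omega

def sortDBData_alt (data : List (String × Int)) : List String × List Int :=
  let d := PySem.Dict.ofList data
  -- for k in data: …
  d.keys.foldl (fun (st : List String × List Int) k =>
    -- lo, hi = 0, len(keys); while lo < hi: … (keys[mid] is always in range)
    let lo : Nat := bisectLoop st.1 k 0 st.1.length
    -- keys.insert(lo, k); sorted_data.insert(lo, data[k])  (k is a key of d, so the lookup never raises)
    (PySem.List.insert st.1 (lo : Int) k, PySem.List.insert st.2 (lo : Int) (d.getD k 0)))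
    ([], [])

-- ===== PRECONDITION & SPEC =====
def Spec_sortDBData (data : List (String × Int)) (out : List String × List Int) : Prop := out = sortDBData_alt data
instance (data : List (String × Int)) (out : List String × List Int) : Decidable (Spec_sortDBData data out) := by unfold Spec_sortDBData; infer_instance

-- ===== CLAIM (what is proved, stated in full; the proofs are below) =====
def Claim_equal_sortDBData : Prop := ∀ (data : List (String × Int)), Dom_sortDBData data → Spec_sortDBData data (sortDBData data)

-- ===== LEMMAS AND PROOFS =====

theorem foldl_append_singleton_eq_map {α β : Type} (f : α → β) (l : List α) (acc : List β) :
    l.foldl (fun acc x => acc ++ [f x]) acc = acc ++ l.map f := by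
  induction l generalizing acc with
  | nil => simp
  | cons x t ih => simp [List.foldl, ih]

-- inserting a fresh key k into a strictly sorted list at the scan position keeps it strictly sorted
theorem ins_step (qs : List String) (k : String) (hs : qs.Pairwise (· < ·)) (hk : k ∉ qs) :
    (qs.takeWhile (fun x => decide (x < k)) ++ k :: qs.dropWhile (fun x => decide (x < k))).Pairwise (· < ·) := by
  set t := qs.takeWhile (fun x => decide (x < k)) with ht
  set dr := qs.dropWhile (fun x => decide (x < k)) with hdr
  have hsplit : t ++ dr = qs := List.takeWhile_append_dropWhile
  have hs' : (t ++ dr).Pairwise (· < ·) := by rw [hsplit]; exact hs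
  rw [List.pairwise_append] at hs'
  obtain ⟨htp, hdrp, hcross⟩ := hs'
  have hdrgt : ∀ b ∈ dr, k < b := by
    intro b hb
    cases hdr0 : dr with
    | nil => simp [hdr0] at hb
    | cons b0 dr' =>
      have hnot : ¬ (b0 < k) := by
        have h := List.head?_dropWhile_not (p := fun x => decide (x < k)) (l := qs)
        rw [← hdr, hdr0] at h
        simpa using h
      have hne : b0 ≠ k := by
        intro h; apply hk; rw [← hsplit, hdr0]; simp [h]
      have hb0k : k < b0 := lt_of_le_of_ne (not_lt.mp hnot) (Ne.symm hne)
      rw [hdr0] at hb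
      rcases List.mem_cons.mp hb with h | h
      · exact h ▸ hb0k
      · rw [hdr0] at hdrp
        exact hb0k.trans ((List.pairwise_cons.mp hdrp).1 b h)
  rw [List.pairwise_append, List.pairwise_cons]
  refine ⟨htp, ⟨hdrgt, hdrp⟩, ?_⟩
  intro a ha b hb
  rcases List.mem_cons.mp hb with h | h
  · exact h ▸ (by simpa using List.mem_takeWhile_imp ha)
  · exact hcross a ha b h

-- on a strictly sorted list, position j holds an element < k exactly when j is below the scan point
theorem sorted_lt_iff (qs : List String) (k : String) (hs : qs.Pairwise (· < ·))
    (j : Nat) (hj : j < qs.length) :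
    (qs[j] < k ↔ j < (qs.takeWhile (fun x => decide (x < k))).length) := by
  set t := qs.takeWhile (fun x => decide (x < k)) with ht
  set dr := qs.dropWhile (fun x => decide (x < k)) with hdr
  have hsplit : t ++ dr = qs := List.takeWhile_append_dropWhile
  have hclen : t.length ≤ qs.length := by rw [← hsplit]; simp
  constructor
  · intro hlt
    by_contra hge
    rw [Nat.not_lt] at hge
    -- qs[t.length] fails the predicate, and qs is increasing from there on
    have hclt : t.length < qs.length := lt_of_le_of_lt hge hj
    have hdrne : dr ≠ [] := by
      intro h0
      rw [← hsplit, h0] at hclt; simp at hclt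
    have hqc : qs[t.length]'hclt = dr.head hdrne := by
      rw [List.getElem_of_eq hsplit.symm hclt,
        List.getElem_append_right (Nat.le_refl _), List.head_eq_getElem]
      simp
    have hnotp : ¬ (qs[t.length]'hclt < k) := by
      rw [hqc]
      have h := List.head?_dropWhile_not (p := fun x => decide (x < k)) (l := qs)
      rw [← hdr, List.head?_eq_some_head hdrne] at h
      simpa using h
    rcases Nat.eq_or_lt_of_le hge with heq | hlt2
    · exact hnotp (heq ▸ hlt)
    · have : qs[t.length]'hclt < qs[j] := List.pairwise_iff_getElem.mp hs _ _ hclt hj hlt2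
      exact hnotp (this.trans hlt)
  · intro hjc
    have : qs[j] = t[j]'hjc := ((List.takeWhile_prefix _).getElem hjc).symm
    rw [this]
    simpa using List.mem_takeWhile_imp (List.getElem_mem hjc)

-- the binary search returns the scan point
theorem bisectLoop_eq_aux (qs : List String) (k : String) (hs : qs.Pairwise (· < ·)) (n : Nat) :
    ∀ lo hi, hi - lo ≤ n → lo ≤ (qs.takeWhile (fun x => decide (x < k))).length →
      (qs.takeWhile (fun x => decide (x < k))).length ≤ hi → hi ≤ qs.length →
      bisectLoop qs k lo hi = (qs.takeWhile (fun x => decide (x < k))).length := by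
  set c := (qs.takeWhile (fun x => decide (x < k))).length with hc
  induction n with
  | zero =>
    intro lo hi hfuel hlc hch hhl
    rw [bisectLoop]
    have : ¬ lo < hi := by omega
    simp [this]; omega
  | succ m ih =>
    intro lo hi hfuel hlc hch hhl
    rw [bisectLoop]
    by_cases hlh : lo < hi
    · have hmid1 : lo ≤ (lo + hi) / 2 := by omega
      have hmid2 : (lo + hi) / 2 < hi := by omega
      have hmidl : (lo + hi) / 2 < qs.length := lt_of_lt_of_le hmid2 hhl
      have hget : qs.getD ((lo + hi) / 2) "" = qs[(lo + hi) / 2] := List.getD_eq_getElem qs "" hmidl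
      by_cases hcmp : qs.getD ((lo + hi) / 2) "" < k
      · have : (lo + hi) / 2 < c := (sorted_lt_iff qs k hs _ hmidl).mp (hget ▸ hcmp)
        simp only [hlh, if_true, hcmp, if_true]
        exact ih ((lo + hi) / 2 + 1) hi (by omega) (by omega) hch hhl
      · have : ¬ ((lo + hi) / 2 < c) := fun h =>
          hcmp (hget ▸ (sorted_lt_iff qs k hs _ hmidl).mpr h)
        simp only [hlh, if_true, hcmp, if_false]
        exact ih lo ((lo + hi) / 2) (by omega) hlc (by omega) (le_of_lt hmidl)
    · simp [hlh]; omega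

theorem bisectLoop_eq (qs : List String) (k : String) (hs : qs.Pairwise (· < ·)) :
    bisectLoop qs k 0 qs.length = (qs.takeWhile (fun x => decide (x < k))).length :=
  bisectLoop_eq_aux qs k hs qs.length 0 qs.length (by omega) (by omega)
    (by
      have h := congrArg List.length (List.takeWhile_append_dropWhile (p := fun x => decide (x < k)) (l := qs))
      simp only [List.length_append] at h
      omega) le_rfl

-- the B-side fold keeps two parallel lists: a strictly sorted key list and its image under g
theorem fold_ins (g : String → Int) (l : List String) (qs : List String)
    (hs : qs.Pairwise (· < ·)) (hnd : (qs ++ l).Nodup) :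
    ∃ R : List String,
      l.foldl (fun (st : List String × List Int) k =>
        (PySem.List.insert st.1 ((bisectLoop st.1 k 0 st.1.length : Nat) : Int) k,
         PySem.List.insert st.2 ((bisectLoop st.1 k 0 st.1.length : Nat) : Int) (g k)))
        (qs, qs.map g)
      = (R, R.map g) ∧ R.Pairwise (· < ·) ∧ R.Perm (qs ++ l) := by
  induction l generalizing qs with
  | nil => exact ⟨qs, by simp, hs, by simp⟩
  | cons k l' ih =>
    set t := qs.takeWhile (fun x => decide (x < k)) with ht
    set dr := qs.dropWhile (fun x => decide (x < k)) with hdr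
    have hsplit : t ++ dr = qs := List.takeWhile_append_dropWhile
    have hklen : t.length ≤ qs.length := by rw [← hsplit]; simp
    have hpm : (qs ++ k :: l').Perm (k :: (qs ++ l')) := List.perm_middle
    have hnd1 : (k :: (qs ++ l')).Nodup := hpm.nodup hnd
    have hknotin : k ∉ qs := fun hmem =>
      (List.nodup_cons.mp hnd1).1 (List.mem_append.mpr (Or.inl hmem))
    have hps : (t ++ k :: dr).Pairwise (· < ·) := ins_step qs k hs hknotin
    have hperm : (t ++ k :: dr).Perm (k :: qs) := by
      calc (t ++ k :: dr).Perm (k :: (t ++ dr)) := List.perm_middle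
        _ = k :: qs := by rw [hsplit]
    have h1 : PySem.List.insert qs ((t.length : Nat) : Int) k = t ++ k :: dr := by
      rw [PySem.List.insert_natCast qs t.length k hklen]
      congr 1
      · rw [← hsplit, List.take_left]
      · rw [← hsplit]
        have : t.length = (t ++ dr).length - dr.length := by simp
        rw [List.drop_left]
    have h2 : PySem.List.insert (qs.map g) ((t.length : Nat) : Int) (g k) = (t ++ k :: dr).map g := by
      rw [PySem.List.insert_natCast (qs.map g) t.length (g k) (by simpa using hklen)]
      conv_lhs => rw [← hsplit]
      rw [← List.map_take, ← List.map_drop, List.take_left, List.drop_left]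
      simp
    have hnd' : ((t ++ k :: dr) ++ l').Nodup := by
      have : ((t ++ k :: dr) ++ l').Perm (k :: (qs ++ l')) := by
        calc ((t ++ k :: dr) ++ l').Perm ((k :: qs) ++ l') := hperm.append_right l'
          _ = k :: (qs ++ l') := by simp
      exact this.symm.nodup hnd1
    obtain ⟨R, heq, hRp, hRperm⟩ := ih (t ++ k :: dr) hps hnd'
    refine ⟨R, ?_, hRp, ?_⟩
    · simp only [List.foldl_cons]
      rw [← heq]
      congr 1
      rw [bisectLoop_eq qs k hs]
      exact Prod.ext h1 h2
    · exact hRperm.trans ((hperm.append_right l').trans (by simpa using hpm.symm))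

-- ===== VERDICT (by name: the statement is the Claim_ definition above) =====
theorem sortDBData_spec : Claim_equal_sortDBData := by
  intro data _
  unfold Spec_sortDBData sortDBData sortDBData_alt
  set d := PySem.Dict.ofList data with hd
  have hnd : d.keys.Nodup := PySem.Dict.nodup_keys_ofList ..
  obtain ⟨R, heq, hRp, hRperm⟩ := fold_ins (fun k => d.getD k 0) d.keys [] (by simp) (by simpa using hnd)
  simp only [List.map_nil] at heq
  have hRperm' : R.Perm d.keys := by simpa using hRperm
  have hsorted : PySem.List.sorted d.keys (fun k => k) false = R :=
    PySem.List.sorted_eq_of_perm_of_pairwise_lt d.keys R (fun k => k) hRperm' hRp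
  simp only []
  rw [heq, foldl_append_singleton_eq_map]
  by_cases hz : d.size = 0
  · have hitems : d.items = [] := List.length_eq_zero_iff.mp hz
    have hkeys : d.keys = [] := by simp [PySem.Dict.keys, hitems]
    have hR : R = [] := by rw [hkeys] at hRperm'; exact List.Perm.eq_nil hRperm'
    simp [hz, hR]
  · simp [hz, hsorted]
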